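-- pv_equiv track=rewrite | github.com/MrBrantCode/unitest_baseline | mut_generate/mist_train_cf/cf_8865/solution.py | reverse_and_get_prime_numbers
-- ===== SOURCE A (Python) =====
-- import math
--
-- def reverse_and_get_prime_numbers(numbers):
--     left = 0
--     right = len(numbers) - 1
--
--     while left < right:
--         numbers[left], numbers[right] = numbers[right], numbers[left]
--         left += 1
--         right -= 1
--
--     prime_numbers = [num for num in numbers if all(num % i != 0 for i in range(2, int(math.sqrt(num)) + 1)) and num > 1]
--
--     return prime_numbers
-- ===== SOURCE B (Python) =====
-- import math
--
-- def reverse_and_get_prime_numbers(numbers):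
--     numbers.reverse()
--     m = max(numbers, default=0)
--     r = math.isqrt(m) if m > 0 else 0
--     # build the ascending list of all primes <= isqrt(max) once,
--     # testing each candidate only against the primes already found
--     primes = []
--     for p in range(2, r + 1):
--         if _no_small_prime_factor(p, primes):
--             primes.append(p)
--     # keep n when no prime q with q*q <= n divides it
--     return [n for n in numbers if n > 1 and _no_small_prime_factor(n, primes)]
--
-- def _no_small_prime_factor(n, primes):
--     for q in primes:
--         if q * q > n:
--             return True
--         if n % q == 0:
--             return False
--     return True
-- ===== Notes on version B (the rewrite author's own statement) =====
-- stated objective: faster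
-- what changed: B reverses with list.reverse() and replaces per-element trial division over all integers up to sqrt(n) by a prime table built once up to isqrt(max(numbers)) (each candidate tested only against previously found primes), so each element is divided only by primes; Pre_ excludes lists containing a negative number, on which A raises ValueError from math.sqrt.
import Mathlib
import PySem

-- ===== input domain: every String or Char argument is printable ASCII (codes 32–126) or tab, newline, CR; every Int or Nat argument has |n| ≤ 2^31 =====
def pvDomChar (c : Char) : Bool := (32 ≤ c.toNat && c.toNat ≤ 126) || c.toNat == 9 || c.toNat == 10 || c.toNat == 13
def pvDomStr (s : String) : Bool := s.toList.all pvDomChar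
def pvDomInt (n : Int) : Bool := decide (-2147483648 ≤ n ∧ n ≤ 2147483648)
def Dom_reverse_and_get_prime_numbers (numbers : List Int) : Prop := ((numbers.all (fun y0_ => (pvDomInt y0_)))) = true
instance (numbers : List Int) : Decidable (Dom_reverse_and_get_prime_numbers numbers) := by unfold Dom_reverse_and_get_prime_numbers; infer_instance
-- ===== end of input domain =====

-- B reverses with list.reverse() and filters by a prime table built once up to isqrt(max),
-- dividing each element only by primes; equivalence is about the RETURN value (both A and B
-- also reverse the argument list in place).


-- ===== PORT A =====
-- the while-loop two-pointer in-place swap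
def pvSwapLoop (xs : List Int) (left right : Int) : List Int :=
  if _h : left < right then
    pvSwapLoop
      (PySem.List.pySetD (PySem.List.pySetD xs left (PySem.List.pyGetD xs right 0)) right
        (PySem.List.pyGetD xs left 0))
      (left + 1) (right - 1)
  else xs
termination_by (right - left).toNat
decreasing_by simp_wf; omega

-- int(math.sqrt(num)) is ported as num.toNat.sqrt: exact for 0 ≤ num ≤ 2^31 (Pre_ ∩ Dom)
def reverse_and_get_prime_numbers (numbers : List Int) : List Int :=
  let numbers := pvSwapLoop numbers 0 ((numbers.length : Int) - 1)
  numbers.filter (fun num =>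
    ((PySem.List.pyRange 2 ((num.toNat.sqrt : Int) + 1)).all
        (fun i => PySem.Int.mod num i != 0)) && decide (num > 1))

-- ===== PORT B =====
def noSmallPrimeFactor (n : Int) (primes : List Int) : Bool :=
  match primes with
  | [] => true
  | q :: rest =>
    if q * q > n then true
    else if PySem.Int.mod n q == 0 then false
    else noSmallPrimeFactor n rest

def reverse_and_get_prime_numbers_alt (numbers : List Int) : List Int :=
  let rev := numbers.reverse
  let m := PySem.List.maxD rev (fun x => x) 0
  let r : Int := if m > 0 then (m.toNat.sqrt : Int) else 0
  let primes := (PySem.List.pyRange 2 (r + 1)).foldl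
    (fun acc p => if noSmallPrimeFactor p acc then acc ++ [p] else acc) []
  rev.filter (fun n => decide (n > 1) && noSmallPrimeFactor n primes)

-- ===== PRECONDITION & SPEC =====
-- Pre_ excludes lists containing a negative number: there 'math.sqrt(num)' raises ValueError in A.
def Pre_reverse_and_get_prime_numbers (numbers : List Int) : Prop := ∀ n ∈ numbers, 0 ≤ n
instance (numbers : List Int) : Decidable (Pre_reverse_and_get_prime_numbers numbers) := by
  unfold Pre_reverse_and_get_prime_numbers; infer_instance
def pvWitness_reverse_and_get_prime_numbers : List Int := [2, 3, 4, 5, 9]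

def Spec_reverse_and_get_prime_numbers (numbers : List Int) (out : List Int) : Prop :=
  out = reverse_and_get_prime_numbers_alt numbers
instance (numbers : List Int) (out : List Int) : Decidable (Spec_reverse_and_get_prime_numbers numbers out) := by
  unfold Spec_reverse_and_get_prime_numbers; infer_instance

-- ===== CLAIM (what is proved, stated in full; the proofs are below) =====
def Claim_equal_reverse_and_get_prime_numbers : Prop :=
  ∀ (numbers : List Int), Dom_reverse_and_get_prime_numbers numbers →
    Pre_reverse_and_get_prime_numbers numbers →
    Spec_reverse_and_get_prime_numbers numbers (reverse_and_get_prime_numbers numbers)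

-- ===== LEMMAS AND PROOFS =====

-- n ≥ 2 is prime if no prime p with p*p ≤ n divides it
theorem nat_prime_of_no_small_prime_dvd (n : Nat) (h2 : 2 ≤ n)
    (H : ∀ p : Nat, p.Prime → p * p ≤ n → ¬ p ∣ n) : n.Prime := by
  by_contra hnp
  have hmf := Nat.minFac_prime (by omega : n ≠ 1)
  have hsq : n.minFac ^ 2 ≤ n := Nat.minFac_sq_le_self (by omega) hnp
  exact H n.minFac hmf (by nlinarith) (Nat.minFac_dvd n)

theorem int_dvd_iff_toNat {a b : Int} (ha : 0 ≤ a) (hb : 0 ≤ b) :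
    a ∣ b ↔ a.toNat ∣ b.toNat := by
  rw [← Int.ofNat_dvd, Int.toNat_of_nonneg ha, Int.toNat_of_nonneg hb]

theorem aTest_eq_prime (num : Int) (h0 : 0 ≤ num) :
    (((PySem.List.pyRange 2 ((num.toNat.sqrt : Int) + 1)).all
        (fun i => PySem.Int.mod num i != 0)) && decide (num > 1))
      = decide (Nat.Prime num.toNat) := by
  by_cases h1 : num > 1
  · have h2 : 2 ≤ num.toNat := by omega
    simp only [h1, decide_true, Bool.and_true]
    by_cases hp : Nat.Prime num.toNat
    · simp only [hp, decide_true, List.all_eq_true]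
      intro i hi
      rw [PySem.List.mem_pyRange_one] at hi
      obtain ⟨hi2, hiu⟩ := hi
      simp only [bne_iff_ne, ne_eq]
      intro hmod
      rw [PySem.Int.mod_eq_zero_iff_dvd] at hmod
      have hidvd : i.toNat ∣ num.toNat := (int_dvd_iff_toNat (by omega) h0).mp hmod
      exact (Nat.prime_def_le_sqrt.mp hp).2 i.toNat (by omega) (by omega) hidvd
    · simp only [hp, decide_false]
      rw [← Bool.not_eq_true, List.all_eq_true]
      intro hall
      apply hp
      rw [Nat.prime_def_le_sqrt]
      refine ⟨h2, fun m hm2 hmle hdvd => ?_⟩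
      have hmem : (m : Int) ∈ PySem.List.pyRange 2 ((num.toNat.sqrt : Int) + 1) := by
        rw [PySem.List.mem_pyRange_one]
        constructor <;> [exact_mod_cast hm2; omega]
      have := hall (m : Int) hmem
      simp only [bne_iff_ne, ne_eq] at this
      apply this
      rw [PySem.Int.mod_eq_zero_iff_dvd]
      exact (int_dvd_iff_toNat (by omega) h0).mpr (by simpa using hdvd)
  · have hnp : ¬ Nat.Prime num.toNat := fun hp => by have := hp.two_le; omega
    simp [h1, hnp]

theorem noSmallPrimeFactor_eq (n : Int) (ps : List Int) (hn : 2 ≤ n)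
    (hsort : ps.Pairwise (· < ·))
    (hmem : ∀ q ∈ ps, 2 ≤ q ∧ Nat.Prime q.toNat)
    (hcomp : ∀ q : Int, 2 ≤ q → Nat.Prime q.toNat → q * q ≤ n → q ∣ n → q ∈ ps) :
    noSmallPrimeFactor n ps = decide (Nat.Prime n.toNat) := by
  induction ps with
  | nil =>
    have hp : Nat.Prime n.toNat := by
      apply nat_prime_of_no_small_prime_dvd n.toNat (by omega)
      intro p hp hple hpdvd
      have h2p : 2 ≤ (p : Int) := by exact_mod_cast hp.two_le
      have : (p : Int) ∈ ([] : List Int) := by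
        apply hcomp _ h2p (by simpa using hp)
        · nlinarith [Int.toNat_of_nonneg (le_trans (by norm_num) hn)]
        · exact (int_dvd_iff_toNat (by omega) (by omega)).mpr (by simpa using hpdvd)
      simp at this
    simp [noSmallPrimeFactor, hp]
  | cons q rest ih =>
    obtain ⟨hq2, hqp⟩ := hmem q (by simp)
    rw [noSmallPrimeFactor]
    by_cases hbig : q * q > n
    · simp only [hbig, if_true]
      have hp : Nat.Prime n.toNat := by
        apply nat_prime_of_no_small_prime_dvd n.toNat (by omega)
        intro p hp hple hpdvd
        have h2p : 2 ≤ (p : Int) := by exact_mod_cast hp.two_le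
        have hplei : (p : Int) * (p : Int) ≤ n := by
          nlinarith [Int.toNat_of_nonneg (le_trans (by norm_num) hn)]
        have hmem' : (p : Int) ∈ q :: rest := by
          apply hcomp _ h2p (by simpa using hp) hplei
          exact (int_dvd_iff_toNat (by omega) (by omega)).mpr (by simpa using hpdvd)
        rcases List.mem_cons.mp hmem' with heq | htail
        · rw [heq] at hplei; omega
        · have hgt : q < (p : Int) := (List.pairwise_cons.mp hsort).1 _ htail
          nlinarith
      simp [hp]
    · simp only [hbig, if_false]
      by_cases hdvd : PySem.Int.mod n q == 0
      · simp only [hdvd, if_true]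
        rw [beq_iff_eq, PySem.Int.mod_eq_zero_iff_dvd] at hdvd
        have hqn : q < n := by nlinarith
        have hnotp : ¬ Nat.Prime n.toNat := by
          intro hp
          have hdvdN : q.toNat ∣ n.toNat := (int_dvd_iff_toNat (by omega) (by omega)).mp hdvd
          rcases (Nat.Prime.eq_one_or_self_of_dvd hp _ hdvdN) with h | h <;> omega
        simp [hnotp]
      · simp only [hdvd]
        apply ih (List.Pairwise.of_cons hsort) (fun x hx => hmem x (by simp [hx]))
        intro p h2p hpp hple hpdvd
        rcases List.mem_cons.mp (hcomp p h2p hpp hple hpdvd) with heq | htail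
        · exfalso
          rw [beq_iff_eq, PySem.Int.mod_eq_zero_iff_dvd] at hdvd
          exact hdvd (heq ▸ hpdvd)
        · exact htail

theorem primes_fold_aux (k : Nat) : ∀ t : Int, t - 2 ≤ (k : Int) →
    (PySem.List.pyRange 2 t).foldl
        (fun acc p => if noSmallPrimeFactor p acc then acc ++ [p] else acc) []
      = (PySem.List.pyRange 2 t).filter (fun p => decide (Nat.Prime p.toNat)) := by
  induction k with
  | zero =>
    intro t ht
    rw [PySem.List.pyRange_one_eq_nil (by omega)]
    rfl
  | succ k ih =>
    intro t ht
    by_cases hle : t ≤ 2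
    · rw [PySem.List.pyRange_one_eq_nil (by omega)]; rfl
    · have h2 : (2 : Int) ≤ t - 1 := by omega
      have hsplit : PySem.List.pyRange 2 t = PySem.List.pyRange 2 (t - 1) ++ [t - 1] := by
        have := PySem.List.pyRange_one_succ_right (a := 2) (b := t - 1) h2
        simpa using this
      rw [hsplit, List.foldl_append, List.filter_append, ih (t - 1) (by omega)]
      set ps := (PySem.List.pyRange 2 (t - 1)).filter (fun p => decide (Nat.Prime p.toNat)) with hps
      have hval : noSmallPrimeFactor (t - 1) ps = decide (Nat.Prime (t - 1).toNat) := by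
        apply noSmallPrimeFactor_eq (t - 1) ps h2
        · exact List.Pairwise.filter _ (PySem.List.pairwise_lt_pyRange_one 2 (t - 1))
        · intro x hx
          rw [hps, List.mem_filter, PySem.List.mem_pyRange_one] at hx
          exact ⟨hx.1.1, by simpa using hx.2⟩
        · intro p h2p hpp hple hpdvd
          rw [hps, List.mem_filter, PySem.List.mem_pyRange_one]
          have h2q : 2 * p ≤ p * p := by nlinarith
          exact ⟨⟨h2p, by omega⟩, by simpa using hpp⟩
      rw [List.foldl_cons, List.foldl_nil, hval]
      cases hB : decide (Nat.Prime (t - 1).toNat) with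
      | false =>
        simp only [List.filter_cons, List.filter_nil, hB, Bool.false_eq_true, if_false,
          List.append_nil]
      | true => simp only [List.filter_cons, List.filter_nil, hB, if_true]

theorem primes_fold_eq (t : Int) :
    (PySem.List.pyRange 2 t).foldl
        (fun acc p => if noSmallPrimeFactor p acc then acc ++ [p] else acc) []
      = (PySem.List.pyRange 2 t).filter (fun p => decide (Nat.Prime p.toNat)) := by
  by_cases h : t ≤ 2
  · exact primes_fold_aux 0 t (by omega)
  · exact primes_fold_aux (t - 2).toNat t (by omega)

theorem le_maxD_of_mem {xs : List Int} {y : Int} (hy : y ∈ xs) :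
    y ≤ PySem.List.maxD xs (fun x => x) 0 := by
  have hne : xs ≠ [] := by rintro rfl; simp at hy
  cases hmx : PySem.List.max? xs (fun x => x) with
  | none => exact absurd ((PySem.List.max?_eq_none_iff _ _).mp hmx) hne
  | some mv =>
    have := PySem.List.max?_isMax hmx y hy
    simpa [PySem.List.maxD, hmx] using this

theorem pyGetD_shift (ys : List Int) (a c : Int) {l : Int} (h0 : 0 ≤ l) (hl : l < (ys.length : Int)) :
    PySem.List.pyGetD (a :: (ys ++ [c])) (l + 1) 0 = PySem.List.pyGetD ys l 0 := by
  rw [PySem.List.pyGetD_of_nonneg _ _ (by omega), PySem.List.pyGetD_of_nonneg _ _ h0]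
  rw [show (l + 1).toNat = l.toNat + 1 by omega]
  rw [List.getD_cons_succ]
  have hlt : l.toNat < ys.length := by omega
  simp [List.getD, List.getElem?_append_left hlt]

theorem pySetD_shift (ys : List Int) (a c v : Int) {l : Int} (h0 : 0 ≤ l) (hl : l < (ys.length : Int)) :
    PySem.List.pySetD (a :: (ys ++ [c])) (l + 1) v = a :: (PySem.List.pySetD ys l v ++ [c]) := by
  rw [PySem.List.pySetD_of_nonneg _ _ (by omega), PySem.List.pySetD_of_nonneg _ _ h0]
  rw [show (l + 1).toNat = l.toNat + 1 by omega]
  rw [List.set_cons_succ]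
  have hlt : l.toNat < ys.length := by omega
  rw [List.set_append_left _ _ hlt]

theorem swapLoop_shift (k : Nat) : ∀ (xs : List Int) (l r a c : Int),
    (r - l).toNat ≤ k → 0 ≤ l → r < (xs.length : Int) →
    pvSwapLoop (a :: (xs ++ [c])) (l + 1) (r + 1) = a :: (pvSwapLoop xs l r ++ [c]) := by
  induction k with
  | zero =>
    intro xs l r a c hk h0 hr
    rw [pvSwapLoop, dif_neg (show ¬ l + 1 < r + 1 by omega)]
    rw [pvSwapLoop, dif_neg (show ¬ l < r by omega)]
  | succ k ih =>
    intro xs l r a c hk h0 hr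
    by_cases hlr : l < r
    · have h0r : (0:Int) ≤ r := by omega
      have hll : l < (xs.length : Int) := by omega
      rw [pvSwapLoop, dif_pos (by omega : l + 1 < r + 1)]
      conv_rhs => rw [pvSwapLoop, dif_pos hlr]
      rw [pyGetD_shift xs a c h0r hr, pyGetD_shift xs a c h0 hll,
          pySetD_shift xs a c _ h0 hll]
      have hr' : r < ((PySem.List.pySetD xs l (PySem.List.pyGetD xs r 0)).length : Int) := by
        rw [PySem.List.length_pySetD]; exact hr
      rw [pySetD_shift _ a c _ h0r hr']
      rw [show r + 1 - 1 = (r - 1) + 1 by ring, show l + 1 + 1 = (l + 1) + 1 by ring]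
      apply ih _ (l + 1) (r - 1) a c (by omega) (by omega)
      rw [PySem.List.length_pySetD, PySem.List.length_pySetD]; omega
    · rw [pvSwapLoop, dif_neg (show ¬ l + 1 < r + 1 by omega)]
      rw [pvSwapLoop, dif_neg hlr]

theorem swapLoop_len_aux (k : Nat) : ∀ (xs : List Int), xs.length ≤ k →
    pvSwapLoop xs 0 ((xs.length : Int) - 1) = xs.reverse := by
  induction k with
  | zero =>
    intro xs h
    have hx : xs = [] := by cases xs <;> simp_all
    subst hx
    rw [pvSwapLoop, dif_neg (by norm_num)]
    rfl
  | succ k ih =>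
    intro xs h
    rcases xs with _ | ⟨a, t⟩
    · rw [pvSwapLoop, dif_neg (by norm_num)]; rfl
    · rcases List.eq_nil_or_concat t with rfl | ⟨ys, c, rfl⟩
      · rw [pvSwapLoop, dif_neg (by norm_num)]; rfl
      · simp only [List.concat_eq_append] at h ⊢
        have hlen : ((a :: (ys ++ [c])).length : Int) - 1 = (ys.length : Int) + 1 := by
          simp
        rw [hlen, pvSwapLoop, dif_pos (by omega : (0:Int) < (ys.length : Int) + 1)]
        have hget1 : PySem.List.pyGetD (a :: (ys ++ [c])) ((ys.length : Int) + 1) 0 = c := by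
          rw [PySem.List.pyGetD_of_nonneg _ _ (by omega),
              show ((ys.length : Int) + 1).toNat = ys.length + 1 by omega]
          rw [List.getD_cons_succ]
          simp [List.getD]
        have hget0 : PySem.List.pyGetD (a :: (ys ++ [c])) 0 0 = a := by
          rw [PySem.List.pyGetD_of_nonneg _ _ (by omega)]; rfl
        have hset0 : PySem.List.pySetD (a :: (ys ++ [c])) 0 c = c :: (ys ++ [c]) := by
          rw [PySem.List.pySetD_of_nonneg _ _ (by omega)]; rfl
        have hset1 : PySem.List.pySetD (c :: (ys ++ [c])) ((ys.length : Int) + 1) a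
            = c :: (ys ++ [a]) := by
          rw [PySem.List.pySetD_of_nonneg _ _ (by omega),
              show ((ys.length : Int) + 1).toNat = ys.length + 1 by omega]
          rw [List.set_cons_succ, List.set_append_right _ _ (le_refl ys.length)]
          simp
        rw [hget1, hget0, hset0, hset1]
        rw [show (0:Int) + 1 = 0 + 1 by ring,
            show (ys.length : Int) + 1 - 1 = ((ys.length : Int) - 1) + 1 by ring]
        rw [swapLoop_shift ys.length ys 0 ((ys.length : Int) - 1) c a (by omega) (by omega) (by omega)]
        rw [ih ys (by simp at h; omega)]
        simp

theorem swapLoop_eq_reverse (xs : List Int) :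
    pvSwapLoop xs 0 ((xs.length : Int) - 1) = xs.reverse :=
  swapLoop_len_aux xs.length xs le_rfl

-- ===== VERDICT (by name: the statement is the Claim_ definition above) =====
theorem reverse_and_get_prime_numbers_spec : Claim_equal_reverse_and_get_prime_numbers := by
  intro numbers _hdom hpre
  unfold Spec_reverse_and_get_prime_numbers
  unfold reverse_and_get_prime_numbers reverse_and_get_prime_numbers_alt
  rw [swapLoop_eq_reverse]
  apply List.filter_congr
  intro x hx
  have hx0 : 0 ≤ x := hpre x (List.mem_reverse.mp hx)
  rw [aTest_eq_prime x hx0]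
  by_cases h1 : x > 1
  · simp only [h1, decide_true, Bool.true_and]
    rw [primes_fold_eq]
    symm
    apply noSmallPrimeFactor_eq x _ (by omega)
    · exact List.Pairwise.filter _ (PySem.List.pairwise_lt_pyRange_one 2 _)
    · intro q hq
      rw [List.mem_filter, PySem.List.mem_pyRange_one] at hq
      exact ⟨hq.1.1, by simpa using hq.2⟩
    · intro q h2q hqp hqle hqdvd
      rw [List.mem_filter, PySem.List.mem_pyRange_one]
      refine ⟨⟨h2q, ?_⟩, by simpa using hqp⟩
      have hxm : x ≤ PySem.List.maxD numbers.reverse (fun x => x) 0 := le_maxD_of_mem hx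
      set m := PySem.List.maxD numbers.reverse (fun x => x) 0 with hm
      have hmpos : 0 < m := by omega
      rw [if_pos hmpos]
      have hqq : q.toNat * q.toNat ≤ m.toNat := by
        have : q * q ≤ m := le_trans hqle hxm
        have h2 : (q.toNat : Int) * (q.toNat : Int) ≤ (m.toNat : Int) := by
          rw [Int.toNat_of_nonneg (by omega), Int.toNat_of_nonneg (by omega)]
          exact this
        exact_mod_cast h2
      have := Nat.le_sqrt.mpr hqq
      omega
  · have hnp : ¬ Nat.Prime x.toNat := fun hp => by have := hp.two_le; omega
    simp [h1, hnp]
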